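-- pv_equiv track=rewrite | github.com/wilmurillo-ai/Design-Assistant | .skills/openclaw-skills/skills/edkuo7/conversation-flow-monitor/scripts/error_handler.py | analyze_conversation_stuck_pattern
-- ===== SOURCE A (Python) =====
-- from typing import Any, Callable, Optional, Dict, List
--
-- def analyze_conversation_stuck_pattern(error_logs: List[Dict]) -> str:
--     """Analyze error logs to identify why conversation got stuck."""
--     if not error_logs:
--         return "No errors detected"
--
--     # Look for timeout patterns
--     timeouts = [e for e in error_logs if e.get('error_type') == 'timeout']
--     if timeouts:
--         return f"Conversation likely stuck due to {len(timeouts)} timeout(s) in browser/file operations"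
--
--     # Look for skill registration errors
--     skill_errors = [e for e in error_logs if 'skill' in e.get('function', '').lower()]
--     if skill_errors:
--         return "Conversation stuck due to skill registration/dependency issues"
--
--     # Look for file operation errors
--     file_errors = [e for e in error_logs if 'file' in e.get('function', '').lower() or 'read' in e.get('function', '').lower()]
--     if file_errors:
--         return "Conversation stuck due to file system access issues"
--
--     return f"Conversation stuck due to {len(error_logs)} unclassified errors"
-- ===== SOURCE B (Python) =====
-- def analyze_conversation_stuck_pattern(error_logs):
--     """Analyze error logs to identify why conversation got stuck."""
--     if not error_logs:
--         return "No errors detected"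
--     # single pass accumulating all three classifications at once
--     timeout_count = 0
--     has_skill = False
--     has_file = False
--     for e in error_logs:
--         if e.get('error_type') == 'timeout':
--             timeout_count += 1
--         fn = e.get('function', '').lower()
--         if 'skill' in fn:
--             has_skill = True
--         if 'file' in fn or 'read' in fn:
--             has_file = True
--     if timeout_count:
--         return f"Conversation likely stuck due to {timeout_count} timeout(s) in browser/file operations"
--     if has_skill:
--         return "Conversation stuck due to skill registration/dependency issues"
--     if has_file:
--         return "Conversation stuck due to file system access issues"
--     return f"Conversation stuck due to {len(error_logs)} unclassified errors"
-- ===== Notes on version B (the rewrite author's own statement) =====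
-- stated objective: alternative
-- what changed: replaces the three separate filtering passes over error_logs with one loop that accumulates a timeout count and skill/file flags, then applies the same priority order
import Mathlib
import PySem

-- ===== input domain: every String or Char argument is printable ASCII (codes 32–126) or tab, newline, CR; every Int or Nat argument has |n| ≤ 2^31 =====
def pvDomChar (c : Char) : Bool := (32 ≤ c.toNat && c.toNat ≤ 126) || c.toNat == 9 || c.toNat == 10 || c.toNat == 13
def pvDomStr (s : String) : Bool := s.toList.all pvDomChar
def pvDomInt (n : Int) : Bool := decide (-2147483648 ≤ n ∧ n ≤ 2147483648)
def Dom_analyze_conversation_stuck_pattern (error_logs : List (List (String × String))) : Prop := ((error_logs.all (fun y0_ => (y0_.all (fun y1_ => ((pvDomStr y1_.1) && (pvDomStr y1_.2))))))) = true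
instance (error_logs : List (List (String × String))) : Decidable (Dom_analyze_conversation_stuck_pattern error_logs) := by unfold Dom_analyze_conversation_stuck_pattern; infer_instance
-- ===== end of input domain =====

-- B replaces A's three separate filtering passes with a single fold accumulating a timeout count and skill/file flags (same priority order); alternative decomposition, same result.


-- shared helpers: transliterations of the dict lookups and comprehension conditions used by both Pythons
-- e.get('function','').lower()
def pvFn (e : List (String × String)) : String :=
  PySem.Str.lower (((PySem.Dict.mk e).get? "function").getD "")
-- e.get('error_type') == 'timeout'
def pvIsTimeout (e : List (String × String)) : Bool :=
  (PySem.Dict.mk e).get? "error_type" == some "timeout"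
-- 'skill' in e.get('function','').lower()
def pvIsSkill (e : List (String × String)) : Bool :=
  PySem.Str.isIn "skill" (pvFn e)
-- 'file' in fn or 'read' in fn
def pvIsFile (e : List (String × String)) : Bool :=
  PySem.Str.isIn "file" (pvFn e) || PySem.Str.isIn "read" (pvFn e)

-- ===== PORT A =====
def analyze_conversation_stuck_pattern (error_logs : List (List (String × String))) : String :=
  if error_logs = [] then "No errors detected"
  else
    let timeouts := error_logs.filter pvIsTimeout
    if timeouts ≠ [] then
      "Conversation likely stuck due to " ++ PySem.Int.toStr (timeouts.length : Int) ++ " timeout(s) in browser/file operations"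
    else
      let skill_errors := error_logs.filter pvIsSkill
      if skill_errors ≠ [] then
        "Conversation stuck due to skill registration/dependency issues"
      else
        let file_errors := error_logs.filter pvIsFile
        if file_errors ≠ [] then
          "Conversation stuck due to file system access issues"
        else
          "Conversation stuck due to " ++ PySem.Int.toStr (error_logs.length : Int) ++ " unclassified errors"

-- ===== PORT B =====
-- single-pass accumulator: (timeout_count, has_skill, has_file)
def pvStep (acc : Int × Bool × Bool) (e : List (String × String)) : Int × Bool × Bool :=
  ((if pvIsTimeout e then acc.1 + 1 else acc.1),
   (acc.2.1 || pvIsSkill e),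
   (acc.2.2 || pvIsFile e))

def analyze_conversation_stuck_pattern_alt (error_logs : List (List (String × String))) : String :=
  if error_logs = [] then "No errors detected"
  else
    let st := error_logs.foldl pvStep (0, false, false)
    if st.1 ≠ 0 then
      "Conversation likely stuck due to " ++ PySem.Int.toStr st.1 ++ " timeout(s) in browser/file operations"
    else if st.2.1 then
      "Conversation stuck due to skill registration/dependency issues"
    else if st.2.2 then
      "Conversation stuck due to file system access issues"
    else
      "Conversation stuck due to " ++ PySem.Int.toStr (error_logs.length : Int) ++ " unclassified errors"

-- ===== PRECONDITION & SPEC =====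
def Spec_analyze_conversation_stuck_pattern (error_logs : List (List (String × String))) (out : String) : Prop := out = analyze_conversation_stuck_pattern_alt error_logs
instance (error_logs : List (List (String × String))) (out : String) : Decidable (Spec_analyze_conversation_stuck_pattern error_logs out) := by unfold Spec_analyze_conversation_stuck_pattern; infer_instance

-- ===== CLAIM (what is proved, stated in full; the proofs are below) =====
def Claim_equal_analyze_conversation_stuck_pattern : Prop := ∀ (error_logs : List (List (String × String))), Dom_analyze_conversation_stuck_pattern error_logs → Spec_analyze_conversation_stuck_pattern error_logs (analyze_conversation_stuck_pattern error_logs)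

-- ===== LEMMAS AND PROOFS =====

-- the fold computes (count of timeouts, any skill, any file)
theorem pvFold_eq (xs : List (List (String × String))) (c : Int) (s f : Bool) :
    xs.foldl pvStep (c, s, f)
      = (c + (xs.countP pvIsTimeout : Int), s || xs.any pvIsSkill, f || xs.any pvIsFile) := by
  induction xs generalizing c s f with
  | nil => simp
  | cons x xs ih =>
    simp only [List.foldl_cons, List.countP_cons, List.any_cons, pvStep, ih]
    by_cases h : pvIsTimeout x <;> simp [h, Bool.or_assoc, add_comm, add_assoc, add_left_comm]

theorem analyze_equal (error_logs : List (List (String × String))) :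
    analyze_conversation_stuck_pattern error_logs = analyze_conversation_stuck_pattern_alt error_logs := by
  unfold analyze_conversation_stuck_pattern analyze_conversation_stuck_pattern_alt
  by_cases hnil : error_logs = []
  · simp [hnil]
  · simp only [hnil, if_false, pvFold_eq, zero_add, Bool.false_or]
    by_cases ht : error_logs.countP pvIsTimeout = 0
    · have hfil : error_logs.filter pvIsTimeout = [] := by
        rwa [List.filter_eq_nil_iff, ← List.countP_eq_zero]
      simp only [hfil, ht]
      by_cases hs : error_logs.any pvIsSkill
      · have : error_logs.filter pvIsSkill ≠ [] := by
          simp only [ne_eq, List.filter_eq_nil_iff]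
          rcases List.any_eq_true.mp hs with ⟨x, hx, hpx⟩
          intro h; exact absurd hpx (by simpa using h x hx)
        simp [this, hs]
      · have hsf : error_logs.filter pvIsSkill = [] := by
          rw [List.filter_eq_nil_iff]; intro x hx
          by_contra hc
          exact hs (List.any_eq_true.mpr ⟨x, hx, by simpa using hc⟩)
        simp only [hsf, hs]
        by_cases hf : error_logs.any pvIsFile
        · have : error_logs.filter pvIsFile ≠ [] := by
            simp only [ne_eq, List.filter_eq_nil_iff]
            rcases List.any_eq_true.mp hf with ⟨x, hx, hpx⟩
            intro h; exact absurd hpx (by simpa using h x hx)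
          simp [this, hf]
        · have hff : error_logs.filter pvIsFile = [] := by
            rw [List.filter_eq_nil_iff]; intro x hx
            by_contra hc
            exact hf (List.any_eq_true.mpr ⟨x, hx, by simpa using hc⟩)
          simp [hff, hf]
    · have hfil : error_logs.filter pvIsTimeout ≠ [] := by
        rw [ne_eq, List.filter_eq_nil_iff, ← List.countP_eq_zero]; exact ht
      have hc : ((error_logs.countP pvIsTimeout : Int)) ≠ 0 := by exact_mod_cast ht
      have hex : ∃ x ∈ error_logs, pvIsTimeout x = true := by
        rcases List.exists_mem_of_ne_nil _ hfil with ⟨x, hx⟩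
        exact ⟨x, (List.mem_filter.mp hx).1, (List.mem_filter.mp hx).2⟩
      simp [hex, List.countP_eq_length_filter]

-- ===== VERDICT (by name: the statement is the Claim_ definition above) =====
theorem analyze_conversation_stuck_pattern_spec : Claim_equal_analyze_conversation_stuck_pattern := by
  intro error_logs _
  unfold Spec_analyze_conversation_stuck_pattern
  exact (analyze_equal error_logs)
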